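-- pv_equiv track=rewrite | github.com/jiviteshjain/wiki-search | src-en/analyse.py | ParsePosting
-- ===== SOURCE A (Python) =====
-- def ParsePosting(posting):
--     parsed_posting = {}
--
--     field = 'd'
--     cur = ''
--
--     for c in posting:
--         if c.isalpha() and c.islower():
--             parsed_posting[field] = int(cur, base=10)
--             field = c
--             cur = ''
--         else:
--             cur += c
--
--     if len(cur) > 0:
--         parsed_posting[field] = int(cur, base=10)
--
--     # Set empty fields to 0.
--     for field in ('t', 'i', 'b', 'c', 'l', 'r'):  # 'd' is guaranteed to be present.
--         if field not in parsed_posting: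
--             parsed_posting[field] = 0
--
--     return parsed_posting
-- ===== SOURCE B (Python) =====
-- def ParsePosting(posting):
--     # Two-phase: tokenize into (field, value-segment) pairs via slice boundaries,
--     # then parse all but a trailing empty segment and fill the defaults.
--     pairs = []
--     field, start = 'd', 0
--     for i, c in enumerate(posting):
--         if c.isalpha() and c.islower():
--             pairs.append((field, posting[start:i]))
--             field, start = c, i + 1
--     pairs.append((field, posting[start:]))
--     result = {f: int(s, 10) for f, s in pairs[:-1]}
--     f, s = pairs[-1]
--     if s:
--         result[f] = int(s, 10)
--     for f in ('t', 'i', 'b', 'c', 'l', 'r'):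
--         result.setdefault(f, 0)
--     return result
-- ===== Notes on version B (the rewrite author's own statement) =====
-- stated objective: alternative
-- what changed: B replaces A's single-pass state machine (mutable field/cur accumulators flushed into the dict at each lowercase letter) by a two-phase algorithm: first tokenize the posting into (field, value-slice) pairs using slice boundaries at A's own isalpha-and-islower separators, then build the dict in a separate parsing pass (dict comprehension over all but a trailing empty segment) and fill the defaults with setdefault.
import Mathlib
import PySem

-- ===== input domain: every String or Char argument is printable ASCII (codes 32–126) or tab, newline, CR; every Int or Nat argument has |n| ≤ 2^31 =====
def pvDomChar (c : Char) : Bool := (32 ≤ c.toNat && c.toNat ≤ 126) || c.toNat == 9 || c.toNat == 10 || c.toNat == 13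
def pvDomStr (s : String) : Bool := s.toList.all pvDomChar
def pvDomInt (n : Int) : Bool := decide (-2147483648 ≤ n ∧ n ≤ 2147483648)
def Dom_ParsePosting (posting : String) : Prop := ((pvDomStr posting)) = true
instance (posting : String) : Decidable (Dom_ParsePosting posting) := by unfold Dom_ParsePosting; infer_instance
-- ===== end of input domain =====

-- B tokenizes the posting into (field, value-slice) pairs in a first phase (using A's own
-- isalpha-and-islower separator test) and builds the dict in a second parsing pass, instead
-- of A's interleaved char-by-char state machine; objective: alternative, same cost.

-- the separator test both Pythons write as 'c.isalpha() and c.islower()'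
def pA (c : Char) : Bool := PySem.Chars.isalpha c && PySem.Chars.islower c

-- int(s, base=10), with 0 standing in for ValueError (Pre_ excludes those inputs)
def pvParseInt (s : List Char) : Int := (PySem.Int.ofCharsBase? s 10).getD 0

-- ===== PORT A =====

def pvAStep (st : PySem.Dict String Int × String × List Char) (c : Char) :
    PySem.Dict String Int × String × List Char :=
  if pA c then
    (st.1.insert st.2.1 (pvParseInt st.2.2), String.singleton c, [])
  else
    (st.1, st.2.1, st.2.2 ++ [c])

def ParsePosting (posting : String) : List (String × Int) :=
  let st := posting.toList.foldl pvAStep (PySem.Dict.empty, "d", [])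
  let d := if st.2.2.length > 0 then st.1.insert st.2.1 (pvParseInt st.2.2) else st.1
  let d := ["t", "i", "b", "c", "l", "r"].foldl
    (fun d f => if d.contains f then d else d.insert f 0) d
  d.items

-- ===== PORT B =====

-- one enumerate step of B's tokenizing loop: state = (pairs, field, start)
def pvBStep (cs : List Char) (st : List (String × List Char) × String × Int)
    (p : Int × Char) : List (String × List Char) × String × Int :=
  if pA p.2 then
    (st.1 ++ [(st.2.1, PySem.List.slice cs (some st.2.2) (some p.1))],
     String.singleton p.2, p.1 + 1)
  else st

def ParsePosting_alt (posting : String) : List (String × Int) :=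
  let cs := posting.toList
  let st := (PySem.List.enumerate cs 0).foldl (pvBStep cs) ([], "d", 0)
  let pairs := st.1 ++ [(st.2.1, PySem.List.slice cs (some st.2.2) none)]
  let d := pairs.dropLast.foldl
    (fun d p => d.insert p.1 (pvParseInt p.2)) PySem.Dict.empty
  let last := pairs.getLastD ("", [])
  let d := if last.2 ≠ [] then d.insert last.1 (pvParseInt last.2) else d
  let d := ["t", "i", "b", "c", "l", "r"].foldl (fun d f => d.setdefault f 0) d
  d.items

-- ===== PRECONDITION & SPEC =====
-- Pre_ excludes exactly the inputs on which A raises ValueError from int(): a value segment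
-- (delimited by A's own isalpha-and-islower field letters) that int() rejects, other than a
-- trailing empty segment, which A leaves unparsed.
def Pre_ParsePosting (posting : String) : Prop :=
  (∀ s ∈ (posting.toList.splitOnP pA).dropLast,
      (PySem.Int.ofCharsBase? s 10).isSome = true) ∧
  ((posting.toList.splitOnP pA).getLastD [] ≠ [] →
      (PySem.Int.ofCharsBase? ((posting.toList.splitOnP pA).getLastD []) 10).isSome = true)
instance (posting : String) : Decidable (Pre_ParsePosting posting) := by
  unfold Pre_ParsePosting; infer_instance

def pvWitness_ParsePosting : String := "5t3i2"

def Spec_ParsePosting (posting : String) (out : List (String × Int)) : Prop :=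
  out = ParsePosting_alt posting
instance (posting : String) (out : List (String × Int)) : Decidable (Spec_ParsePosting posting out) := by
  unfold Spec_ParsePosting; infer_instance

-- ===== CLAIM (what is proved, stated in full; the proofs are below) =====
def Claim_equal_ParsePosting : Prop := ∀ (posting : String), Dom_ParsePosting posting → Pre_ParsePosting posting → Spec_ParsePosting posting (ParsePosting posting)

-- ===== LEMMAS AND PROOFS =====

-- proof-side tokenizer: the list of (field, segment) pairs, read off structurally
def pvFindall (f : String) (acc : List Char) : List Char → List (String × List Char)
  | [] => [(f, acc)]
  | c :: cs =>
    if pA c then (f, acc) :: pvFindall (String.singleton c) [] cs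
    else pvFindall f (acc ++ [c]) cs

lemma pvFindall_ne_nil (f : String) (acc : List Char) (cs : List Char) :
    pvFindall f acc cs ≠ [] := by
  cases cs with
  | nil => simp [pvFindall]
  | cons c cs => unfold pvFindall; split <;> simp [pvFindall_ne_nil]

-- B's pair-processing phase, shaped like ParsePosting_alt's middle lets
def pvProc (d : PySem.Dict String Int) (pairs : List (String × List Char)) :
    PySem.Dict String Int :=
  let init := pairs.dropLast
  let last := pairs.getLastD ("", [])
  let d := init.foldl (fun d p => d.insert p.1 (pvParseInt p.2)) d
  if last.2 ≠ [] then d.insert last.1 (pvParseInt last.2) else d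

lemma pvProc_cons (d : PySem.Dict String Int) (f : String) (s : List Char)
    (L : List (String × List Char)) (hL : L ≠ []) :
    pvProc d ((f, s) :: L) = pvProc (d.insert f (pvParseInt s)) L := by
  obtain ⟨p, ps, rfl⟩ : ∃ p ps, L = p :: ps := by
    cases L with
    | nil => exact absurd rfl hL
    | cons p ps => exact ⟨p, ps, rfl⟩
  simp only [pvProc, List.dropLast_cons_of_ne_nil hL, List.getLastD_cons, List.foldl_cons]

-- A's state machine, finished by the trailing insert, equals pvProc of the tokenization
lemma pvMain (cs : List Char) (d : PySem.Dict String Int) (f : String) (acc : List Char) :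
    (if (cs.foldl pvAStep (d, f, acc)).2.2.length > 0 then
       (cs.foldl pvAStep (d, f, acc)).1.insert (cs.foldl pvAStep (d, f, acc)).2.1
         (pvParseInt (cs.foldl pvAStep (d, f, acc)).2.2)
     else (cs.foldl pvAStep (d, f, acc)).1)
    = pvProc d (pvFindall f acc cs) := by
  induction cs generalizing d f acc with
  | nil =>
    simp only [List.foldl, pvFindall]
    by_cases h : acc = []
    · subst h; simp [pvProc]
    · rw [if_pos (by simpa using List.length_pos_iff.mpr h)]
      simp [pvProc, h]
  | cons c cs ih =>
    simp only [List.foldl, pvFindall, pvAStep]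
    by_cases h : pA c = true
    · rw [if_pos h, if_pos h, pvProc_cons _ _ _ _ (pvFindall_ne_nil _ _ _)]
      exact ih _ _ _
    · rw [if_neg h, if_neg h]; exact ih _ _ _

-- B's tokenizing loop (enumerate + slices) produces exactly pvFindall
lemma pvTok (cs : List Char) (l : List Char) (j s0 : Nat) (P : List (String × List Char))
    (f : String) (hdrop : cs.drop j = l) (hle : s0 ≤ j) :
    (let st := (PySem.List.enumerate l (j : Int)).foldl (pvBStep cs) (P, f, (s0 : Int));
     st.1 ++ [(st.2.1, PySem.List.slice cs (some st.2.2) none)])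
    = P ++ pvFindall f ((cs.drop s0).take (j - s0)) l := by
  induction l generalizing j s0 P f with
  | nil =>
    simp only [PySem.List.enumerate_nil, List.foldl_nil, pvFindall,
      PySem.List.slice_from_natCast]
    have hlen : cs.length ≤ j := by
      by_contra hc
      have : cs.drop j ≠ [] := by
        simp [List.drop_eq_nil_iff]; omega
      exact this hdrop
    have : (cs.drop s0).take (j - s0) = cs.drop s0 := by
      apply List.take_of_length_le
      simp; omega
    rw [this]
  | cons c l ih =>
    have hdrop' : cs.drop (j + 1) = l := by
      have := congrArg List.tail hdrop
      simpa [List.tail_drop] using this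
    have hget : cs[j]? = some c := by
      have h0 : (cs.drop j)[0]? = some c := by rw [hdrop]; rfl
      simpa using h0
    simp only [PySem.List.enumerate_cons, List.foldl_cons, pvBStep, pvFindall]
    by_cases h : pA c = true
    · rw [if_pos h, if_pos h]
      have hslice : PySem.List.slice cs (some (s0 : Int)) (some (j : Int))
          = (cs.drop s0).take (j - s0) := PySem.List.slice_natCast cs s0 j
      have := ih (j + 1) (j + 1) (P ++ [(f, PySem.List.slice cs (some (s0:Int)) (some (j:Int)))])
        (String.singleton c) hdrop' (le_refl _)
      rw [show ((j:Int) + 1) = ((j + 1 : Nat) : Int) by push_cast; ring]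
      rw [this, hslice, List.append_assoc]
      simp
    · rw [if_neg h, if_neg h]
      have := ih (j + 1) s0 P f hdrop' (by omega)
      rw [show ((j:Int) + 1) = ((j + 1 : Nat) : Int) by push_cast; ring]
      rw [this]
      have hstep : (cs.drop s0).take (j + 1 - s0) = (cs.drop s0).take (j - s0) ++ [c] := by
        have hg : (cs.drop s0)[j - s0]? = some c := by
          rw [List.getElem?_drop]
          rwa [show s0 + (j - s0) = j by omega]
        rw [show j + 1 - s0 = (j - s0) + 1 by omega, List.take_add_one, hg]
        rfl
      rw [hstep]

lemma pvSetdefault_eq (d : PySem.Dict String Int) (f : String) :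
    d.setdefault f 0 = if d.contains f then d else d.insert f 0 := by
  by_cases h : d.contains f = true
  · rw [PySem.Dict.setdefault_of_contains d 0 h, if_pos h]
  · rw [PySem.Dict.setdefault_of_not_contains d 0 (by simpa using h),
      if_neg (by simpa using h)]

-- ===== VERDICT (by name: the statement is the Claim_ definition above) =====
theorem ParsePosting_spec : Claim_equal_ParsePosting := by
  intro posting _ _
  show ParsePosting posting = ParsePosting_alt posting
  have htok := pvTok posting.toList posting.toList 0 0 [] "d" (by simp) (le_refl 0)
  simp only [List.drop_zero, Nat.sub_zero, List.take_zero, List.nil_append,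
    Nat.cast_zero] at htok
  simp only [ParsePosting, ParsePosting_alt, pvMain, pvSetdefault_eq, htok, pvProc]
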